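-- pv_equiv track=rewrite | github.com/uranm/symplactix | symplectic_code.py | newthing
-- ===== SOURCE A (Python) =====
-- def word_operator_e(word,n, i):
--     i_indices = []
--     word_prim = list(reversed((word)))
--     for ind, letter in enumerate(word_prim):
--         if letter == i+1 or letter == 2*n - i+1:
--             i_indices.append(ind)
--         elif letter == i or letter == 2*n - i:
--             if len(i_indices) > 0:
--                 i_indices.pop()
--     if len(i_indices) == 0:
--         return -1
--     result_word_prim = [x for x in word_prim]
--     if word_prim[i_indices[0]] == i+1:
--         result_word_prim[i_indices[0]] = i
--     else:
--         result_word_prim[i_indices[0]] = 2*n-i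
--     return list(reversed((result_word_prim)))
--
-- def newthing(A,n):
--     connected = list()
--     connected.append(A)
--     for A in connected:
--         for i in range(1,n+1):
--             if (word_operator_e(A,n,i) != -1) and (word_operator_e(A,n,i)) not in connected:
--                 connected.append(word_operator_e(A,n,i))
--                 break
--     return connected
-- ===== SOURCE B (Python) =====
-- def _op_e(word, n, i):
--     # lattice-path characterization: walk the word left to right keeping the
--     # prefix sum s of (+1 per closer, -1 per opener) and its running minimum m;
--     # the acted-on position is the last opener seen while s == m.
--     s = 0
--     m = 0
--     pos = -1
--     for j, x in enumerate(word):
--         if x == i + 1 or x == 2 * n - i + 1: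
--             if s == m:
--                 pos = j
--             s -= 1
--             if s < m:
--                 m = s
--         elif x == i or x == 2 * n - i:
--             s += 1
--     if pos < 0:
--         return None
--     return word[:pos] + [i if word[pos] == i + 1 else 2 * n - i] + word[pos + 1:]
--
-- def newthing(A, n):
--     # closure as a FIFO queue implemented with two stacks; each dequeued word
--     # enqueues at most its first not-yet-seen operator image (set membership).
--     done = []
--     front, back = [A], []
--     seen = {tuple(A)}
--     while front or back:
--         if not front:
--             front = back[::-1]
--             back = []
--         w = front.pop()
--         done.append(w)
--         r = next((r for i in range(1, n + 1)
--                     for r in [_op_e(w, n, i)]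
--                     if r is not None and tuple(r) not in seen), None)
--         if r is not None:
--             back.append(r)
--             seen.add(tuple(r))
--     return done
-- ===== Notes on version B (the rewrite author's own statement) =====
-- stated objective: alternative
-- what changed: B replaces A's reversed-word index-stack matching by a lattice-path characterization of the operator (one left-to-right pass tracking the prefix sum and its running minimum, result rebuilt by slicing), and replaces A's rescanned growing list by a FIFO queue implemented with two stacks plus a set of tuples for membership.
import Mathlib
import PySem

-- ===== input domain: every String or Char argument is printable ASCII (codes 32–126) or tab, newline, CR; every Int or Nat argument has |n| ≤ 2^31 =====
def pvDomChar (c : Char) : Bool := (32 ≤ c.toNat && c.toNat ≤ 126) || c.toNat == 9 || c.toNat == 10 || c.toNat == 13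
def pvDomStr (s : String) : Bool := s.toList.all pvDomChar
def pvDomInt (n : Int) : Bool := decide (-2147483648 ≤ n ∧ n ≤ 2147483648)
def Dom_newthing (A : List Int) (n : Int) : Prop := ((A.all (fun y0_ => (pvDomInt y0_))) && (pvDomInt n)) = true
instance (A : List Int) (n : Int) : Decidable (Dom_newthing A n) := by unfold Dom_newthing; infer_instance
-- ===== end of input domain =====

-- B replaces A's reversed-word index-stack operator by a lattice-path scan (prefix sum +
-- running minimum, result rebuilt by slicing) and A's rescanned growing list by a two-stack
-- FIFO queue with a set for membership (objective: alternative).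

-- shared totality guard: upper bound on the number of loop iterations (each move decrements
-- one letter, so the reachable words form a finite grid)
def pvFuel (A : List Int) : Nat := A.foldl (fun s x => s * (x.natAbs + 1)) 1 + 1

-- ===== PORT A =====
-- the i_indices loop of word_operator_e: stack of indices over the reversed word
def pvStackA (n i : Int) : List Int → Nat → List Nat → List Nat
  | [], _, st => st
  | x :: rest, k, st =>
      pvStackA n i rest (k + 1)
        (if x = i + 1 ∨ x = 2 * n - i + 1 then st ++ [k]
         else if x = i ∨ x = 2 * n - i then st.dropLast
         else st)

-- word_operator_e; `none` is Python's -1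
def wordOperatorE (word : List Int) (n i : Int) : Option (List Int) :=
  let wp := word.reverse
  match (pvStackA n i wp 0 []).head? with
  | none => none
  | some j => some ((wp.set j (if wp.getD j 0 = i + 1 then i else 2 * n - i)).reverse)

-- inner `for i in range(1, n+1): ... break`
def pvInnerA (n : Int) : List Int → List (List Int) → List Int → List (List Int)
  | [], conn, _ => conn
  | i :: rest, conn, w =>
      match wordOperatorE w n i with
      | some r => if r ∈ conn then pvInnerA n rest conn w else conn ++ [r]
      | none => pvInnerA n rest conn w

-- `for A in connected` over the growing list, as an index loop
def pvLoopA (n : Int) : Nat → List (List Int) → Nat → List (List Int)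
  | 0, conn, _ => conn
  | f + 1, conn, idx =>
      match conn[idx]? with
      | some w => pvLoopA n f (pvInnerA n (PySem.List.pyRange 1 (n + 1) 1) conn w) (idx + 1)
      | none => conn

def newthing (A : List Int) (n : Int) : List (List Int) :=
  pvLoopA n (pvFuel A) [A] 0

-- ===== PORT B =====
-- _op_e's lattice-path scan: state (s, m, pos) = prefix sum, running minimum, last opener
-- position seen while s = m (Option Nat for Source B's -1 sentinel)
def pvScanC (n i : Int) : List Int → Nat → Int → Int → Option Nat → Int × Int × Option Nat
  | [], _, s, m, pos => (s, m, pos)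
  | x :: rest, j, s, m, pos =>
      if x = i + 1 ∨ x = 2 * n - i + 1 then
        let pos' := if s = m then some j else pos
        let s' := s - 1
        let m' := if s' < m then s' else m
        pvScanC n i rest (j + 1) s' m' pos'
      else if x = i ∨ x = 2 * n - i then pvScanC n i rest (j + 1) (s + 1) m pos
      else pvScanC n i rest (j + 1) s m pos

-- _op_e: word[:pos] + [new letter] + word[pos+1:]
def opE_alt (word : List Int) (n i : Int) : Option (List Int) :=
  match (pvScanC n i word 0 0 0 none).2.2 with
  | none => none
  | some p =>
      some (PySem.List.slice word none (some (p : Int)) ++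
            [if word.getD p 0 = i + 1 then i else 2 * n - i] ++
            PySem.List.slice word (some ((p : Int) + 1)) none)

-- Source B's next(...): first i in the range whose image is new
def pvFirstB (n : Int) : List Int → PySem.Set (List Int) → List Int → Option (List Int)
  | [], _, _ => none
  | i :: rest, seen, w =>
      match opE_alt w n i with
      | some r => if r ∈ seen then pvFirstB n rest seen w else some r
      | none => pvFirstB n rest seen w

-- the while loop: FIFO queue as two stacks (front kept in pop order), done = output prefix
def pvQueueB (n : Int) :
    Nat → List (List Int) → List (List Int) → List (List Int) → PySem.Set (List Int) →
      List (List Int)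
  | 0, done, front, back, _ => done ++ front ++ back   -- fuel guard only; never reached
  | f + 1, done, front, back, seen =>
      if front = [] ∧ back = [] then done
      else
        let fr := if front = [] then back else front
        let bk := if front = [] then [] else back
        match fr with
        | [] => done   -- unreachable: fr nonempty by the guard
        | w :: fs =>
            match pvFirstB n (PySem.List.pyRange 1 (n + 1) 1) seen w with
            | some r => pvQueueB n f (done ++ [w]) fs (bk ++ [r]) (PySem.Set.add seen r)
            | none => pvQueueB n f (done ++ [w]) fs bk seen

def newthing_alt (A : List Int) (n : Int) : List (List Int) :=
  pvQueueB n (pvFuel A) [] [A] [] (PySem.Set.ofList [A])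

-- ===== PRECONDITION & SPEC =====
def Spec_newthing (A : List Int) (n : Int) (out : List (List Int)) : Prop := out = newthing_alt A n
instance (A : List Int) (n : Int) (out : List (List Int)) : Decidable (Spec_newthing A n out) := by unfold Spec_newthing; infer_instance

-- ===== CLAIM (what is proved, stated in full; the proofs are below) =====
def Claim_equal_newthing : Prop := ∀ (A : List Int) (n : Int), Dom_newthing A n → Spec_newthing A n (newthing A n)

-- ===== LEMMAS AND PROOFS =====

-- proof-side: forward counter scan (pending closers), bridging the two ports
def pvScanB (n i : Int) : List Int → Nat → Nat → Option Nat → Nat × Option Nat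
  | [], _, c, pos => (c, pos)
  | x :: rest, j, c, pos =>
      if x = i + 1 ∨ x = 2 * n - i + 1 then
        (if c > 0 then pvScanB n i rest (j + 1) (c - 1) pos
         else pvScanB n i rest (j + 1) c (some j))
      else if x = i ∨ x = 2 * n - i then pvScanB n i rest (j + 1) (c + 1) pos
      else pvScanB n i rest (j + 1) c pos

-- proof-side: right-to-left survivor scan of the stacked word: (unmatched closers, surviving opener indices)
def pvSurv (n i : Int) : List Int → Nat → Nat × List Nat
  | [], _ => (0, [])
  | x :: rest, k =>
      let p := pvSurv n i rest (k + 1)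
      if x = i + 1 ∨ x = 2 * n - i + 1 then
        (if p.1 > 0 then (p.1 - 1, p.2) else (p.1, k :: p.2))
      else if x = i ∨ x = 2 * n - i then (p.1 + 1, p.2)
      else p

theorem pvSurv_bounds (n i : Int) : ∀ (l : List Int) (k : Nat), ∀ m ∈ (pvSurv n i l k).2, k ≤ m ∧ m < k + l.length := by
  intro l
  induction l with
  | nil => intro k m hm; simp [pvSurv] at hm
  | cons x rest ih =>
    intro k m hm
    simp only [pvSurv] at hm
    split_ifs at hm with h1 h2 h3
    · have := ih (k + 1) m hm
      simp only [List.length_cons]; omega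
    · rcases List.mem_cons.mp hm with h | h
      · subst h; simp only [List.length_cons]; omega
      · have := ih (k + 1) m h
        simp only [List.length_cons]; omega
    · have := ih (k + 1) m hm
      simp only [List.length_cons]; omega
    · have := ih (k + 1) m hm
      simp only [List.length_cons]; omega

theorem pvStackA_eq_surv (n i : Int) :
    ∀ (l : List Int) (k : Nat) (st : List Nat),
      pvStackA n i l k st = st.take (st.length - (pvSurv n i l k).1) ++ (pvSurv n i l k).2 := by
  intro l
  induction l with
  | nil => intro k st; simp [pvStackA, pvSurv]
  | cons x rest ih =>
    intro k st
    rcases hp : pvSurv n i rest (k + 1) with ⟨c, S⟩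
    simp only [pvStackA, pvSurv, hp]
    split_ifs with h1 h2 h3
    · rw [ih, hp]
      simp only [List.length_append, List.length_cons, List.length_nil]
      rw [List.take_append_of_le_length (by omega)]
      congr 2
      omega
    · rw [ih, hp]
      have h0 : c = 0 := by omega
      subst h0
      simp [List.take_append]
    · rw [ih, hp]
      rw [List.dropLast_eq_take, List.take_take, List.length_take]
      congr 2
      omega
    · rw [ih, hp]

theorem pvScanB_append (n i : Int) :
    ∀ (l₁ l₂ : List Int) (j c : Nat) (pos : Option Nat),
      pvScanB n i (l₁ ++ l₂) j c pos =
        pvScanB n i l₂ (j + l₁.length) (pvScanB n i l₁ j c pos).1 (pvScanB n i l₁ j c pos).2 := by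
  intro l₁
  induction l₁ with
  | nil => intro l₂ j c pos; simp [pvScanB]
  | cons x rest ih =>
    intro l₂ j c pos
    simp only [List.cons_append, pvScanB, List.length_cons]
    have harith : ∀ m : Nat, j + 1 + m = j + (m + 1) := by omega
    split_ifs with h1 h2 h3 <;> rw [ih, harith]

theorem pvScanB_eq_surv (n i : Int) :
    ∀ (l : List Int) (k j : Nat),
      pvScanB n i l.reverse j 0 none =
        ((pvSurv n i l k).1,
          (pvSurv n i l k).2.head?.map (fun m => j + (l.length - 1 - (m - k)))) := by
  intro l
  induction l with
  | nil => intro k j; simp [pvScanB, pvSurv]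
  | cons x rest ih =>
    intro k j
    rw [List.reverse_cons, pvScanB_append n i rest.reverse [x] j 0 none, ih (k + 1) j]
    have hb := pvSurv_bounds n i rest (k + 1)
    rcases hp : pvSurv n i rest (k + 1) with ⟨c, S⟩
    rw [hp] at hb
    have hP : S.head?.map (fun m => j + (rest.length - 1 - (m - (k + 1)))) =
        S.head?.map (fun m => j + ((x :: rest).length - 1 - (m - k))) := by
      cases S with
      | nil => rfl
      | cons m S' =>
        have := hb m (List.mem_cons_self ..)
        simp only [List.head?_cons, Option.map_some, List.length_cons]
        congr 2
        omega
    simp only [hP]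
    by_cases h1 : x = i + 1 ∨ x = 2 * n - i + 1
    · by_cases hc : c > 0
      · simp [pvScanB, pvSurv, hp, h1, hc]
      · have h0 : c = 0 := by omega
        subst h0
        simp [pvScanB, pvSurv, hp, h1]
    · by_cases h2 : x = i ∨ x = 2 * n - i
      · simp [pvScanB, pvSurv, hp, h1, h2]
      · simp [pvScanB, pvSurv, hp, h1, h2]

theorem pvSet_reverse (l : List Int) (j : Nat) (v : Int) (h : j < l.length) :
    (l.reverse.set j v).reverse = l.set (l.length - 1 - j) v := by
  apply List.ext_getElem (by simp)
  intro p h1 h2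
  have hp : p < l.length := by simpa using h2
  rw [List.getElem_reverse]
  simp only [List.length_set, List.length_reverse]
  rw [List.getElem_set, List.getElem_set]
  by_cases hj : j = l.length - 1 - p
  · rw [if_pos hj, if_pos (by omega)]
  · rw [if_neg hj, if_neg (by omega), List.getElem_reverse]
    congr 1
    omega

-- the lattice-path scan computes the same position as the pending-closer counter scan
theorem pvScanC_eq_scanB (n i : Int) :
    ∀ (l : List Int) (j : Nat) (s m : Int) (c : Nat) (pos : Option Nat), s = m + c →
      (pvScanC n i l j s m pos).2.2 = (pvScanB n i l j c pos).2 := by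
  intro l
  induction l with
  | nil => intro j s m c pos h; rfl
  | cons x rest ih =>
    intro j s m c pos h
    simp only [pvScanC, pvScanB]
    split_ifs <;>
      first
        | exact ih _ _ _ _ _ (by omega)
        | (exfalso; omega)

theorem opE_eq (w : List Int) (n i : Int) : wordOperatorE w n i = opE_alt w n i := by
  have hstack : pvStackA n i w.reverse 0 [] = (pvSurv n i w.reverse 0).2 := by
    simpa using pvStackA_eq_surv n i w.reverse 0 []
  have hscan := pvScanB_eq_surv n i w.reverse 0 0
  rw [List.reverse_reverse] at hscan
  have hC : (pvScanC n i w 0 0 0 none).2.2 = (pvScanB n i w 0 0 none).2 :=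
    pvScanC_eq_scanB n i w 0 0 0 0 none (by omega)
  simp only [wordOperatorE, opE_alt, hC]
  rw [hstack, hscan]
  rcases hS : (pvSurv n i w.reverse 0).2 with _ | ⟨m, S'⟩
  · simp
  · have hm := pvSurv_bounds n i w.reverse 0 m (by rw [hS]; exact List.mem_cons_self ..)
    simp only [List.length_reverse] at hm
    simp only [List.head?_cons, Option.map_some, Nat.zero_add, Nat.sub_zero, List.length_reverse]
    have hget : w.reverse.getD m 0 = w.getD (w.length - 1 - m) 0 := by
      rw [List.getD_eq_getElem?_getD, List.getD_eq_getElem?_getD,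
        List.getElem?_reverse (by simpa using hm.2)]
    have hlt : w.length - 1 - m < w.length := by omega
    rw [hget, pvSet_reverse _ _ _ (by simpa using hm.2)]
    congr 1
    rw [List.set_eq_take_cons_drop _ hlt]
    rw [PySem.List.slice_to_natCast]
    have : ((w.length - 1 - m : Nat) : Int) + 1 = ((w.length - m : Nat) : Int) := by
      omega
    rw [this, PySem.List.slice_from_natCast]
    have hdrop : w.drop (w.length - m) = w.drop (w.length - 1 - m + 1) := by
      congr 1
      omega
    simp [hdrop]

def pvInv (conn : List (List Int)) (seen : PySem.Set (List Int)) : Prop :=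
  ∀ x, x ∈ seen ↔ x ∈ conn

-- the first-new search matches A's inner loop (given the membership invariant)
theorem pvFirstB_eq (n : Int) :
    ∀ (is : List Int) (conn : List (List Int)) (seen : PySem.Set (List Int)) (w : List Int),
      pvInv conn seen →
        pvInnerA n is conn w =
          (match pvFirstB n is seen w with
           | some r => conn ++ [r]
           | none => conn) ∧
        (∀ r, pvFirstB n is seen w = some r → r ∉ conn) := by
  intro is
  induction is with
  | nil => intro conn seen w h; exact ⟨rfl, by intro r hr; cases hr⟩
  | cons i rest ih =>
    intro conn seen w h
    simp only [pvInnerA, pvFirstB, ← opE_eq]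
    cases wordOperatorE w n i with
    | none => exact ih conn seen w h
    | some r =>
      dsimp only
      by_cases hr : r ∈ seen
      · rw [if_pos hr, if_pos ((h r).mp hr)]
        exact ih conn seen w h
      · have hc : r ∉ conn := fun hc => hr ((h r).mpr hc)
        rw [if_neg hr, if_neg hc]
        refine ⟨rfl, ?_⟩
        intro r' hr'
        cases hr'
        exact hc

theorem pvInv_add (conn : List (List Int)) (seen : PySem.Set (List Int)) (r : List Int)
    (h : pvInv conn seen) (hr : r ∉ conn) : pvInv (conn ++ [r]) (PySem.Set.add seen r) := by
  intro x
  have hrs : r ∉ seen := fun hx => hr ((h r).mp hx)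
  have hadd : PySem.Set.add seen r = seen ++ [r] := by
    simp only [PySem.Set.add, PySem.Set.contains]
    rw [if_neg (by simpa using hrs)]
  rw [hadd]
  simp only [List.mem_append, List.mem_singleton]
  exact or_congr_left (h x)

-- queue invariant: A's connected list is done ++ front ++ back and idx = done.length
theorem pvQueueB_eq (n : Int) :
    ∀ (f : Nat) (done front back : List (List Int)) (seen : PySem.Set (List Int)),
      pvInv (done ++ front ++ back) seen →
        pvQueueB n f done front back seen = pvLoopA n f (done ++ front ++ back) done.length := by
  intro f
  induction f with
  | zero => intro done front back seen h; simp [pvQueueB, pvLoopA]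
  | succ f ih =>
    intro done front back seen h
    by_cases hemp : front = [] ∧ back = []
    · obtain ⟨h1, h2⟩ := hemp
      subst h1; subst h2
      simp [pvQueueB, pvLoopA]
    · rcases hfr : (if front = [] then back else front) with _ | ⟨w, fs⟩
      · exfalso
        by_cases hf : front = []
        · rw [if_pos hf] at hfr; exact hemp ⟨hf, hfr⟩
        · rw [if_neg hf] at hfr; exact hf hfr
      · have hconn : done ++ front ++ back =
            done ++ (w :: fs ++ (if front = [] then [] else back)) := by
          by_cases hf : front = []
          · rw [if_pos hf] at hfr ⊢
            subst hf; simp [hfr]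
          · rw [if_neg hf] at hfr ⊢
            simp [hfr]
        have hget : (done ++ front ++ back)[done.length]? = some w := by
          rw [hconn]
          simp
        have hstep := pvFirstB_eq n (PySem.List.pyRange 1 (n + 1) 1)
          (done ++ front ++ back) seen w h
        simp only [pvQueueB, if_neg hemp, hfr]
        simp only [pvLoopA, hget]
        rcases hF : pvFirstB n (PySem.List.pyRange 1 (n + 1) 1) seen w with _ | r
        · rw [hF] at hstep
          have hinner : pvInnerA n (PySem.List.pyRange 1 (n + 1) 1)
              (done ++ front ++ back) w = done ++ front ++ back := hstep.1
          rw [hinner]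
          dsimp only
          have hX : (done ++ [w]) ++ fs ++ (if front = [] then [] else back) =
              done ++ front ++ back := by
            rw [hconn]; simp
          rw [ih _ _ _ _ (by rw [hX]; exact h), hX]
          simp
        · rw [hF] at hstep
          have hrnot : r ∉ done ++ front ++ back := hstep.2 r rfl
          have hinner : pvInnerA n (PySem.List.pyRange 1 (n + 1) 1)
              (done ++ front ++ back) w = (done ++ front ++ back) ++ [r] := hstep.1
          rw [hinner]
          dsimp only
          have hX : (done ++ [w]) ++ fs ++ ((if front = [] then [] else back) ++ [r]) =
              (done ++ front ++ back) ++ [r] := by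
            rw [hconn]; simp
          rw [ih _ _ _ _ (by rw [hX]; exact pvInv_add _ _ _ h hrnot), hX]
          simp

-- ===== VERDICT (by name: the statement is the Claim_ definition above) =====
theorem newthing_spec : Claim_equal_newthing := by
  intro A n _
  unfold Spec_newthing newthing newthing_alt
  have h := pvQueueB_eq n (pvFuel A) [] [A] [] (PySem.Set.ofList [A]) ?_
  · simpa using h.symm
  · intro x
    simp [PySem.Set.ofList, PySem.Set.add, PySem.Set.empty]
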